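-- pv_equiv track=rewrite | github.com/WChan1027/Algorithm-Problem | Baekjoon/Silver/2193. 이친수.py | pinary_number
-- ===== SOURCE A (Python) =====
-- def pinary_number(n):
--     if n == 1:
--         return 1
--     elif n == 2:
--         return 1
--
--     dp = [[0, 0] for _ in range(n + 1)]
--
--     dp[1][0] = 0
--     dp[1][1] = 1
--     dp[2][0] = 1
--     dp[2][1] = 0
--
--     for i in range(3, n + 1):
--         dp[i][0] = dp[i - 1][0] + dp[i - 1][1]
--         dp[i][1] = dp[i - 1][0]
--
--     total = dp[n][0] + dp[n][1]
--     return total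
-- ===== SOURCE B (Python) =====
-- def pinary_number(n):
--     # Fast-doubling Fibonacci: fd(k) = (F(k), F(k+1)); answer = F(n).
--     def fd(k):
--         if k == 0:
--             return (0, 1)
--         a, b = fd(k >> 1)
--         c = a * (2 * b - a)
--         d = a * a + b * b
--         if k & 1:
--             return (d, c + d)
--         return (c, d)
--     return fd(n)[0]
-- ===== Notes on version B (the rewrite author's own statement) =====
-- stated objective: faster
-- what changed: Replaces the O(n) two-column DP table with the fast-doubling Fibonacci recursion (the count of pinary numbers of length n is the n-th Fibonacci number), computed in O(log n) multiplications.
-- crash fix: For n = 0 A raises IndexError while B returns 0 (for negative n both fail: A with IndexError, B with RecursionError). — e.g. on pinary_number(0): A raises IndexError, B returns 0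
import Mathlib
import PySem

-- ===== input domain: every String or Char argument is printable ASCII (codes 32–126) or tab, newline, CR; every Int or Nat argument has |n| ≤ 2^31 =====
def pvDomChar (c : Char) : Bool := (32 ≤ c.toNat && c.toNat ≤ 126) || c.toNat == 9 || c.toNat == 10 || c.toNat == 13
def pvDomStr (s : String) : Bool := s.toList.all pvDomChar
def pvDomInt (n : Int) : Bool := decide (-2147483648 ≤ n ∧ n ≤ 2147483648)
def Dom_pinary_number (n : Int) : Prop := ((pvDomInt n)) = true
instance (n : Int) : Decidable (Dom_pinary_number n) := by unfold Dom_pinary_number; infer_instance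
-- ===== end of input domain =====

-- B replaces A's O(n) two-column DP with the O(log n) fast-doubling Fibonacci
-- recursion; the equivalence proved is on Pre_ (n ≥ 1), where A returns.

-- ===== PORT A =====
-- 'for i in range(3, n+1)': structural recursion on the loop counter over the
-- same dp list; the inner two-element lists [x, y] are ported as pairs (x, y).
def pinaryLoopA (dp : List (Int × Int)) (i n : Nat) : List (Int × Int) :=
  if _h : i ≤ n then
    let prev := dp.getD (i - 1) (0, 0)
    pinaryLoopA (dp.set i (prev.1 + prev.2, prev.1)) (i + 1) n
  else dp
termination_by n + 1 - i

def pinary_number (n : Int) : Int :=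
  if n == 1 then 1
  else if n == 2 then 1
  else
    let dp := List.replicate (n + 1).toNat ((0 : Int), (0 : Int))  -- [[0,0] for _ in range(n+1)]
    let dp := dp.set 1 (0, 1)      -- dp[1][0] = 0; dp[1][1] = 1
    let dp := dp.set 2 (1, 0)      -- dp[2][0] = 1; dp[2][1] = 0
    let dp := pinaryLoopA dp 3 n.toNat
    let last := dp.getD n.toNat (0, 0)   -- dp[n] (in range on Pre_)
    last.1 + last.2

-- ===== PORT B =====
-- fast doubling: fd k = (F(k), F(k+1)); values are Ints exactly as in Source B
def pinaryFd (k : Nat) : Int × Int :=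
  if h : k = 0 then (0, 1)
  else
    let p := pinaryFd (k / 2)    -- k >> 1
    let a := p.1
    let b := p.2
    let c := a * (2 * b - a)
    let d := a * a + b * b
    if k % 2 = 1 then (d, c + d) else (c, d)
decreasing_by exact Nat.div_lt_self (Nat.pos_of_ne_zero h) (by norm_num)

def pinary_number_alt (n : Int) : Int := (pinaryFd n.toNat).1

-- ===== PRECONDITION & SPEC =====
-- Pre_ excludes exactly n ≤ 0, where the Python A raises IndexError.
def Pre_pinary_number (n : Int) : Prop := 1 ≤ n
instance (n : Int) : Decidable (Pre_pinary_number n) := by unfold Pre_pinary_number; infer_instance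
def pvWitness_pinary_number : Int := 5

-- For n = 0 A raises IndexError while B returns 0.
def Raises_pinary_number (n : Int) : Prop := n = 0
instance (n : Int) : Decidable (Raises_pinary_number n) := by unfold Raises_pinary_number; infer_instance
def pvRaiseWitness_pinary_number : Int := 0
def pvRaiseWitnessOut_pinary_number : Int := 0

def Spec_pinary_number (n : Int) (out : Int) : Prop := out = pinary_number_alt n
instance (n : Int) (out : Int) : Decidable (Spec_pinary_number n out) := by unfold Spec_pinary_number; infer_instance

-- ===== CLAIM (what is proved, stated in full; the proofs are below) =====
def Claim_equal_pinary_number : Prop := ∀ (n : Int), Dom_pinary_number n → Pre_pinary_number n → Spec_pinary_number n (pinary_number n)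
def Claim_raises_pinary_number : Prop := (∀ (n : Int), Dom_pinary_number n → Raises_pinary_number n → ¬ Pre_pinary_number n) ∧ (Dom_pinary_number (pvRaiseWitness_pinary_number) ∧ Raises_pinary_number (pvRaiseWitness_pinary_number) ∧ pinary_number_alt (pvRaiseWitness_pinary_number) = pvRaiseWitnessOut_pinary_number)

-- ===== LEMMAS AND PROOFS =====

-- B's side: fast doubling computes consecutive Fibonacci numbers.
theorem pinaryFd_eq (k : Nat) : pinaryFd k = ((Nat.fib k : Int), (Nat.fib (k + 1) : Int)) := by
  induction k using Nat.strong_induction_on with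
  | _ k ih =>
    rw [pinaryFd]
    by_cases h : k = 0
    · simp [h]
    · simp only [h, dif_neg, not_false_iff]
      rw [ih (k / 2) (Nat.div_lt_self (Nat.pos_of_ne_zero h) (by norm_num))]
      have hle : Nat.fib (k / 2) ≤ 2 * Nat.fib (k / 2 + 1) := by
        have := Nat.fib_le_fib_succ (n := k / 2); omega
      rcases Nat.even_or_odd k with he | ho
      · obtain ⟨m, hm⟩ := he
        have hk2 : k / 2 = m := by omega
        have hmod : ¬ (k % 2 = 1) := by omega
        have h1 := Nat.fib_two_mul m
        have h2 := Nat.fib_two_mul_add_one m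
        simp only [hmod, if_neg, not_false_iff, hk2]
        have hfle : Nat.fib m ≤ 2 * Nat.fib (m + 1) := by rw [hk2] at hle; exact hle
        simp only [Prod.mk.injEq]
        refine ⟨?_, ?_⟩
        · have : k = 2 * m := by omega
          rw [this, h1]; push_cast [hfle]; ring
        · have : k + 1 = 2 * m + 1 := by omega
          rw [this, h2]; push_cast; ring
      · obtain ⟨m, hm⟩ := ho
        have hk2 : k / 2 = m := by omega
        have hmod : k % 2 = 1 := by omega
        have h1 := Nat.fib_two_mul m
        have h2 := Nat.fib_two_mul_add_one m
        have h3 : Nat.fib (2 * m + 2) = Nat.fib (2 * m) + Nat.fib (2 * m + 1) := by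
          have := Nat.fib_add_two (n := 2 * m); omega
        have hfle : Nat.fib m ≤ 2 * Nat.fib (m + 1) := by rw [hk2] at hle; exact hle
        simp only [hmod, if_pos, hk2]
        simp only [Prod.mk.injEq]
        refine ⟨?_, ?_⟩
        · rw [hm, h2]; push_cast; ring
        · have : k + 1 = 2 * m + 2 := by omega
          rw [this, h3, h1, h2]; push_cast [hfle]; ring

-- A's side: loop invariant. If dp[i-1] = (F(i-2), F(i-3)) entering iteration i,
-- then after the loop dp[n] = (F(n-1), F(n-2)).
theorem pinaryLoopA_getD (dp : List (Int × Int)) (i n : Nat)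
    (h3 : 3 ≤ i) (hin : i ≤ n + 1) (hlen : dp.length = n + 1)
    (hprev : dp.getD (i - 1) (0, 0) = ((Nat.fib (i - 2) : Int), (Nat.fib (i - 3) : Int))) :
    (pinaryLoopA dp i n).getD n (0, 0) = ((Nat.fib (n - 1) : Int), (Nat.fib (n - 2) : Int)) := by
  induction hk : n + 1 - i generalizing dp i with
  | zero =>
    have hni : i = n + 1 := by omega
    rw [pinaryLoopA]
    simp only [show ¬ i ≤ n by omega, dif_neg, not_false_iff]
    have : i - 1 = n := by omega
    rw [this] at hprev
    rw [hprev]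
    congr 2 <;> [congr 1; congr 1] <;> omega
  | succ k ih =>
    have hle : i ≤ n := by omega
    rw [pinaryLoopA]
    simp only [hle, dif_pos]
    rw [hprev]
    apply ih
    · omega
    · omega
    · simp [hlen]
    · have hi : i < dp.length := by omega
      have : i + 1 - 1 = i := by omega
      rw [this]
      rw [List.getD_eq_getElem?_getD, List.getElem?_set_self (by omega), Option.getD_some]
      have e1 : Nat.fib (i - 2) + Nat.fib (i - 3) = Nat.fib (i + 1 - 2) := by
        have := Nat.fib_add_two (n := i - 3)
        have h1 : i - 3 + 2 = i - 1 := by omega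
        have h2 : i + 1 - 2 = i - 1 := by omega
        rw [h1] at this
        rw [h2, this]
        have : i - 3 + 1 = i - 2 := by omega
        rw [this]; omega
      have e2 : i - 2 = i + 1 - 3 := by omega
      rw [← e1, e2]
      push_cast; ring_nf
    · omega

-- main equality on Pre_
theorem pinary_eq_fib (n : Int) (h : 1 ≤ n) : pinary_number n = (Nat.fib n.toNat : Int) := by
  unfold pinary_number
  by_cases h1 : n = 1
  · simp [h1]
  · by_cases h2 : n = 2
    · simp [h2]
    · have hn3 : 3 ≤ n := by omega
      simp only [h1, h2, beq_iff_eq, if_neg, not_false_iff]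
      set N := n.toNat with hN
      have hN3 : 3 ≤ N := by omega
      have hNn : (n + 1).toNat = N + 1 := by omega
      rw [hNn]
      have hlen : ((List.replicate (N + 1) ((0:Int), (0:Int))).set 1 (0, 1) |>.set 2 (1, 0)).length = N + 1 := by
        simp
      rw [pinaryLoopA_getD _ 3 N (by omega) (by omega) hlen]
      · have hfib : Nat.fib N = Nat.fib (N - 2) + Nat.fib (N - 1) := by
          have := Nat.fib_add_two (n := N - 2)
          have e1 : N - 2 + 2 = N := by omega
          have e2 : N - 2 + 1 = N - 1 := by omega
          rw [e1, e2] at this; omega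
        rw [hfib]; push_cast; ring
      · rw [List.getD_eq_getElem?_getD, List.getElem?_set_self (by simp; omega), Option.getD_some]
        norm_num

theorem pinary_alt_eq_fib (n : Int) : pinary_number_alt n = (Nat.fib n.toNat : Int) := by
  unfold pinary_number_alt
  rw [pinaryFd_eq]

-- ===== VERDICT (by name: the statement is the Claim_ definition above) =====
theorem pinary_number_spec : Claim_equal_pinary_number := by
  intro n _ hpre
  unfold Spec_pinary_number
  rw [pinary_eq_fib n hpre, pinary_alt_eq_fib]

theorem pinary_number_raises : Claim_raises_pinary_number := by
  unfold Claim_raises_pinary_number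
  constructor
  · intro n _ hr; unfold Raises_pinary_number at hr; unfold Pre_pinary_number; omega
  · exact ⟨by decide, by decide, by norm_num [pinary_alt_eq_fib, pvRaiseWitness_pinary_number, pvRaiseWitnessOut_pinary_number]⟩

theorem pvRaiseWitness_ok : pinary_number_alt pvRaiseWitness_pinary_number = pvRaiseWitnessOut_pinary_number := by
  have h := pinary_number_raises
  unfold Claim_raises_pinary_number at h
  exact h.2.2.2
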